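-- pv_equiv track=rewrite | github.com/gabe9/rubik-1 | rubik.py | solveWhiteCornersCorner
-- ===== SOURCE A (Python) =====
-- def solveWhiteCornersCorner(corner):
--
--     for key in corner:
--         if (key == "front"):
--             if (corner[key] == (0,0)):
--                 return ["L","Di","Li"] + solveWhiteCornersCorner({ "front" : (2,0) })
--             elif (corner[key] == (0,2)):
--                 return ["Ri","D","R"] + solveWhiteCornersCorner({ "front" : (2,2) })
--             elif (corner[key] == (2,0)):
--                 return ["D","Ri","Di","R"]
--             elif (corner[key] == (2,2)):
--
--                 return ["F","D","Fi"]
--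
--         elif (key == "top"):
--             if (corner[key] == (0,0)):
--                 return ["B","D","Bi"] + solveWhiteCornersCorner({ "front" : (2,0) })
--             elif (corner[key] == (0,2)):
--                 return ["Bi","Di","B"] + solveWhiteCornersCorner({ "front" : (2,2) })
--             elif (corner[key] == (2,0)):
--                 return ["L"] + solveWhiteCornersCorner({ "front" : (2,0) }) + ["Li"]
--             elif (corner[key] == (2,2)):
--                 return []
--
--         elif (key == "left"):
--             if (corner[key] == (0,0)):
--                 return ["Li","D"] + solveWhiteCornersCorner({ "front" : (2,0) }) + ["L"]
--             elif (corner[key] == (0,2)):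
--                 return ["L","D"] + solveWhiteCornersCorner({ "front" : (2,2) }) + ["Li"]
--             elif (corner[key] == (2,0)):
--                 return ["D"] + solveWhiteCornersCorner({ "front": (2,0) })
--             elif (corner[key] == (2,2)):
--                 return ["D"] + solveWhiteCornersCorner({ "front": (2,2) })
--
--         elif (key == "back"):
--             if (corner[key] == (0,0)):
--                 return ["Bi","Di","B"] + solveWhiteCornersCorner({ "right" : (2,0) })
--             elif (corner[key] == (0,2)):
--                 return ["B","D","Bi"] + solveWhiteCornersCorner({ "left" : (2,2) })
--             elif (corner[key] == (2,0)):
--                 return ["Di"] + solveWhiteCornersCorner({ "right" : (2,0) })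
--             elif (corner[key] == (2,2)):
--                 return ["Di"] + solveWhiteCornersCorner({ "right" : (2,2) })
--
--         elif (key == "right"):
--             if (corner[key] == (0,0)):
--                 return ["Ri","Di","R"] + solveWhiteCornersCorner({ "front" : (2,0) })
--             elif (corner[key] == (0,2)):
--                 return ["R","Di","Di","Ri","D"] + solveWhiteCornersCorner({ "front" : (2,2) })
--             elif (corner[key] == (2,0)):
--                 return ["Ri","Di","R"]
--             elif (corner[key] == (2,2)):
--                 return ["Di"] + solveWhiteCornersCorner({ "front" : (2,2) })
--
--         elif (key == "bot"):
--             if (corner[key] == (0,0)):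
--                 return ["D"] + solveWhiteCornersCorner({ "bot" : (0,2) })
--             elif (corner[key] == (0,2)):
--                 return ["F","Di","Fi"] + solveWhiteCornersCorner({ "back" : (2,2) })
--             elif (corner[key] == (2,0)):
--                 return ["Di"] + solveWhiteCornersCorner({ "bot" : (2,2) })
--             elif (corner[key] == (2,2)):
--                 return ["F","D","D","Fi"] + solveWhiteCornersCorner({ "right" : (2,0) })
--     return []
-- ===== SOURCE B (Python) =====
-- # Closed-form rewrite: A's recursion is fully unfolded offline into a table of
-- # complete move sequences (stored as compact strings); lookup + split replaces
-- # all recursion.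
-- _ANS = {
--     ("front", (0, 0)): "L Di Li D Ri Di R",
--     ("front", (0, 2)): "Ri D R F D Fi",
--     ("front", (2, 0)): "D Ri Di R",
--     ("front", (2, 2)): "F D Fi",
--     ("top", (0, 0)): "B D Bi D Ri Di R",
--     ("top", (0, 2)): "Bi Di B F D Fi",
--     ("top", (2, 0)): "L D Ri Di R Li",
--     ("top", (2, 2)): "",
--     ("left", (0, 0)): "Li D D Ri Di R L",
--     ("left", (0, 2)): "L D F D Fi Li",
--     ("left", (2, 0)): "D D Ri Di R",
--     ("left", (2, 2)): "D F D Fi",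
--     ("back", (0, 0)): "Bi Di B Ri Di R",
--     ("back", (0, 2)): "B D Bi D F D Fi",
--     ("back", (2, 0)): "Di Ri Di R",
--     ("back", (2, 2)): "Di Di F D Fi",
--     ("right", (0, 0)): "Ri Di R D Ri Di R",
--     ("right", (0, 2)): "R Di Di Ri D F D Fi",
--     ("right", (2, 0)): "Ri Di R",
--     ("right", (2, 2)): "Di F D Fi",
--     ("bot", (0, 0)): "D F Di Fi Di Di F D Fi",
--     ("bot", (0, 2)): "F Di Fi Di Di F D Fi",
--     ("bot", (2, 0)): "Di F D D Fi Ri Di R",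
--     ("bot", (2, 2)): "F D D Fi Ri Di R",
-- }
--
--
-- def solveWhiteCornersCorner(corner):
--     for key in corner:
--         seq = _ANS.get((key, corner[key]))
--         if seq is not None:
--             return seq.split()
--     return []
-- ===== Notes on version B (the rewrite author's own statement) =====
-- stated objective: simpler
-- what changed: A's self-recursive branch cascade is fully unfolded offline into a static closed-form table mapping each (face, position) to its complete move sequence stored as one compact string; the function is a single scan that returns the first matching entry, split into moves -- no recursion, no branching on positions at runtime.
import Mathlib
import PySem

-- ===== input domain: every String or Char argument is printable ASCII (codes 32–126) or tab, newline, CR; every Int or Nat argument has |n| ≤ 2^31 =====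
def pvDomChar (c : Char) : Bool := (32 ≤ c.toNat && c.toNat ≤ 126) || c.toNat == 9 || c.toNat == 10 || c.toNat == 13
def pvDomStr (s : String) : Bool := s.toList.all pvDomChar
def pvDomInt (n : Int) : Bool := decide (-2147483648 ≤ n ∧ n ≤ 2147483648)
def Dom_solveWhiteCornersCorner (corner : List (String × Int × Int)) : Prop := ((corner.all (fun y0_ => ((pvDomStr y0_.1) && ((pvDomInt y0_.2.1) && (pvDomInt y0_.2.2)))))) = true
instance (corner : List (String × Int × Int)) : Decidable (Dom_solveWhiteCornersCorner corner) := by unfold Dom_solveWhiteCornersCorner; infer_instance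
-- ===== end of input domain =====

-- B replaces A's recursion by a closed-form table of complete move sequences
-- (A's recursion fully unfolded offline), one lookup + split (objective: simpler).

-- ===== PORT A =====
-- corner[key]: Python dict lookup = first match in the association list
def pvLookupA (corner : List (String × Int × Int)) (key : String) : Option (Int × Int) :=
  (PySem.Dict.mk corner).get? key

-- the for-loop of A: scan the keys of `corner` (the pairs in `rest`), recursive calls
-- on the literal single-key dicts of A's source; `fuel` is a totality guard only
-- (recursion depth of A is at most 5, so fuel 6 is never exhausted).
def pvGoA (fuel : Nat) (corner : List (String × Int × Int)) (rest : List (String × Int × Int)) : List String :=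
  match fuel, rest with
  | _, [] => []
  | 0, _ => []  -- fuel guard, unreachable
  | Nat.succ f, (key, _) :: tl =>
    match pvLookupA corner key with
    | none => pvGoA (Nat.succ f) corner tl  -- unreachable: key comes from corner
    | some v =>
      if key = "front" then
        if v = (0,0) then ["L","Di","Li"] ++ pvGoA f [("front",2,0)] [("front",2,0)]
        else if v = (0,2) then ["Ri","D","R"] ++ pvGoA f [("front",2,2)] [("front",2,2)]
        else if v = (2,0) then ["D","Ri","Di","R"]
        else if v = (2,2) then ["F","D","Fi"]
        else pvGoA (Nat.succ f) corner tl
      else if key = "top" then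
        if v = (0,0) then ["B","D","Bi"] ++ pvGoA f [("front",2,0)] [("front",2,0)]
        else if v = (0,2) then ["Bi","Di","B"] ++ pvGoA f [("front",2,2)] [("front",2,2)]
        else if v = (2,0) then ["L"] ++ pvGoA f [("front",2,0)] [("front",2,0)] ++ ["Li"]
        else if v = (2,2) then []
        else pvGoA (Nat.succ f) corner tl
      else if key = "left" then
        if v = (0,0) then ["Li","D"] ++ pvGoA f [("front",2,0)] [("front",2,0)] ++ ["L"]
        else if v = (0,2) then ["L","D"] ++ pvGoA f [("front",2,2)] [("front",2,2)] ++ ["Li"]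
        else if v = (2,0) then ["D"] ++ pvGoA f [("front",2,0)] [("front",2,0)]
        else if v = (2,2) then ["D"] ++ pvGoA f [("front",2,2)] [("front",2,2)]
        else pvGoA (Nat.succ f) corner tl
      else if key = "back" then
        if v = (0,0) then ["Bi","Di","B"] ++ pvGoA f [("right",2,0)] [("right",2,0)]
        else if v = (0,2) then ["B","D","Bi"] ++ pvGoA f [("left",2,2)] [("left",2,2)]
        else if v = (2,0) then ["Di"] ++ pvGoA f [("right",2,0)] [("right",2,0)]
        else if v = (2,2) then ["Di"] ++ pvGoA f [("right",2,2)] [("right",2,2)]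
        else pvGoA (Nat.succ f) corner tl
      else if key = "right" then
        if v = (0,0) then ["Ri","Di","R"] ++ pvGoA f [("front",2,0)] [("front",2,0)]
        else if v = (0,2) then ["R","Di","Di","Ri","D"] ++ pvGoA f [("front",2,2)] [("front",2,2)]
        else if v = (2,0) then ["Ri","Di","R"]
        else if v = (2,2) then ["Di"] ++ pvGoA f [("front",2,2)] [("front",2,2)]
        else pvGoA (Nat.succ f) corner tl
      else if key = "bot" then
        if v = (0,0) then ["D"] ++ pvGoA f [("bot",0,2)] [("bot",0,2)]
        else if v = (0,2) then ["F","Di","Fi"] ++ pvGoA f [("back",2,2)] [("back",2,2)]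
        else if v = (2,0) then ["Di"] ++ pvGoA f [("bot",2,2)] [("bot",2,2)]
        else if v = (2,2) then ["F","D","D","Fi"] ++ pvGoA f [("right",2,0)] [("right",2,0)]
        else pvGoA (Nat.succ f) corner tl
      else pvGoA (Nat.succ f) corner tl
termination_by (fuel, rest.length)

def solveWhiteCornersCorner (corner : List (String × Int × Int)) : List String :=
  pvGoA 6 corner corner

-- ===== PORT B =====
-- the closed-form answer table _ANS of Source B: state ↦ complete move sequence
def pvAns : PySem.Dict (String × Int × Int) String :=
  PySem.Dict.mk [
    (("front",0,0), "L Di Li D Ri Di R"),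
    (("front",0,2), "Ri D R F D Fi"),
    (("front",2,0), "D Ri Di R"),
    (("front",2,2), "F D Fi"),
    (("top",0,0), "B D Bi D Ri Di R"),
    (("top",0,2), "Bi Di B F D Fi"),
    (("top",2,0), "L D Ri Di R Li"),
    (("top",2,2), ""),
    (("left",0,0), "Li D D Ri Di R L"),
    (("left",0,2), "L D F D Fi Li"),
    (("left",2,0), "D D Ri Di R"),
    (("left",2,2), "D F D Fi"),
    (("back",0,0), "Bi Di B Ri Di R"),
    (("back",0,2), "B D Bi D F D Fi"),
    (("back",2,0), "Di Ri Di R"),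
    (("back",2,2), "Di Di F D Fi"),
    (("right",0,0), "Ri Di R D Ri Di R"),
    (("right",0,2), "R Di Di Ri D F D Fi"),
    (("right",2,0), "Ri Di R"),
    (("right",2,2), "Di F D Fi"),
    (("bot",0,0), "D F Di Fi Di Di F D Fi"),
    (("bot",0,2), "F Di Fi Di Di F D Fi"),
    (("bot",2,0), "Di F D D Fi Ri Di R"),
    (("bot",2,2), "F D D Fi Ri Di R")]

-- Source B's loop: first key whose (key, corner[key]) the table answers; split() it
def pvScanB (corner : List (String × Int × Int)) : List (String × Int × Int) → List String
  | [] => []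
  | (key, _) :: tl =>
    match (PySem.Dict.mk corner).get? key with
    | none => pvScanB corner tl  -- unreachable: key comes from corner
    | some v =>
      match pvAns.get? (key, v) with
      | none => pvScanB corner tl
      | some seq => PySem.Str.split₀ seq

def solveWhiteCornersCorner_alt (corner : List (String × Int × Int)) : List String :=
  pvScanB corner corner

-- ===== PRECONDITION & SPEC =====
def Spec_solveWhiteCornersCorner (corner : List (String × Int × Int)) (out : List String) : Prop := out = solveWhiteCornersCorner_alt corner
instance (corner : List (String × Int × Int)) (out : List String) : Decidable (Spec_solveWhiteCornersCorner corner out) := by unfold Spec_solveWhiteCornersCorner; infer_instance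

-- ===== CLAIM (what is proved, stated in full; the proofs are below) =====
def Claim_equal_solveWhiteCornersCorner : Prop := ∀ (corner : List (String × Int × Int)), Dom_solveWhiteCornersCorner corner → Spec_solveWhiteCornersCorner corner (solveWhiteCornersCorner corner)

-- ===== LEMMAS AND PROOFS =====

-- A's for-loop over `rest` computes exactly B's table scan
theorem pvGoA_eq_scanB (corner : List (String × Int × Int)) :
    ∀ rest, pvGoA 6 corner rest = pvScanB corner rest := by
  intro rest
  induction rest with
  | nil => simp [pvGoA, pvScanB]
  | cons hd tl ih =>
    obtain ⟨key, v0⟩ := hd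
    rw [pvGoA, pvScanB]
    cases h : pvLookupA corner key with
    | none =>
      simp only [pvLookupA] at h
      simp [h, ih]
    | some v =>
      have h' : (PySem.Dict.mk corner).get? key = some v := h
      simp only [h']
      by_cases h1 : key = "front"
      · subst h1
        by_cases hv1 : v = (0,0); · subst hv1; simp [pvGoA, pvLookupA, pvAns, PySem.Dict.get?]; decide
        by_cases hv2 : v = (0,2); · subst hv2; simp [pvGoA, pvLookupA, pvAns, PySem.Dict.get?]; decide
        by_cases hv3 : v = (2,0); · subst hv3; simp [pvAns, PySem.Dict.get?]; decide
        by_cases hv4 : v = (2,2); · subst hv4; simp [pvAns, PySem.Dict.get?]; decide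
        simp [pvAns, PySem.Dict.get?, beq_iff_eq, Prod.ext_iff, hv1, hv2, hv3, hv4, Ne.symm hv1, Ne.symm hv2, Ne.symm hv3, Ne.symm hv4, ih]
      · by_cases h2 : key = "top"
        · subst h2
          by_cases hv1 : v = (0,0); · subst hv1; simp [pvGoA, pvLookupA, pvAns, PySem.Dict.get?]; decide
          by_cases hv2 : v = (0,2); · subst hv2; simp [pvGoA, pvLookupA, pvAns, PySem.Dict.get?]; decide
          by_cases hv3 : v = (2,0); · subst hv3; simp [pvGoA, pvLookupA, pvAns, PySem.Dict.get?]; decide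
          by_cases hv4 : v = (2,2); · subst hv4; simp [pvAns, PySem.Dict.get?]; decide
          simp [pvAns, PySem.Dict.get?, beq_iff_eq, Prod.ext_iff, hv1, hv2, hv3, hv4, Ne.symm hv1, Ne.symm hv2, Ne.symm hv3, Ne.symm hv4, ih]
        · by_cases h3 : key = "left"
          · subst h3
            by_cases hv1 : v = (0,0); · subst hv1; simp [pvGoA, pvLookupA, pvAns, PySem.Dict.get?]; decide
            by_cases hv2 : v = (0,2); · subst hv2; simp [pvGoA, pvLookupA, pvAns, PySem.Dict.get?]; decide
            by_cases hv3 : v = (2,0); · subst hv3; simp [pvGoA, pvLookupA, pvAns, PySem.Dict.get?]; decide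
            by_cases hv4 : v = (2,2); · subst hv4; simp [pvGoA, pvLookupA, pvAns, PySem.Dict.get?]; decide
            simp [pvAns, PySem.Dict.get?, beq_iff_eq, Prod.ext_iff, hv1, hv2, hv3, hv4, Ne.symm hv1, Ne.symm hv2, Ne.symm hv3, Ne.symm hv4, ih]
          · by_cases h4 : key = "back"
            · subst h4
              by_cases hv1 : v = (0,0); · subst hv1; simp [pvGoA, pvLookupA, pvAns, PySem.Dict.get?]; decide
              by_cases hv2 : v = (0,2); · subst hv2; simp [pvGoA, pvLookupA, pvAns, PySem.Dict.get?]; decide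
              by_cases hv3 : v = (2,0); · subst hv3; simp [pvGoA, pvLookupA, pvAns, PySem.Dict.get?]; decide
              by_cases hv4 : v = (2,2); · subst hv4; simp [pvGoA, pvLookupA, pvAns, PySem.Dict.get?]; decide
              simp [pvAns, PySem.Dict.get?, beq_iff_eq, Prod.ext_iff, hv1, hv2, hv3, hv4, Ne.symm hv1, Ne.symm hv2, Ne.symm hv3, Ne.symm hv4, ih]
            · by_cases h5 : key = "right"
              · subst h5
                by_cases hv1 : v = (0,0); · subst hv1; simp [pvGoA, pvLookupA, pvAns, PySem.Dict.get?]; decide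
                by_cases hv2 : v = (0,2); · subst hv2; simp [pvGoA, pvLookupA, pvAns, PySem.Dict.get?]; decide
                by_cases hv3 : v = (2,0); · subst hv3; simp [pvAns, PySem.Dict.get?]; decide
                by_cases hv4 : v = (2,2); · subst hv4; simp [pvGoA, pvLookupA, pvAns, PySem.Dict.get?]; decide
                simp [pvAns, PySem.Dict.get?, beq_iff_eq, Prod.ext_iff, hv1, hv2, hv3, hv4, Ne.symm hv1, Ne.symm hv2, Ne.symm hv3, Ne.symm hv4, ih]
              · by_cases h6 : key = "bot"
                · subst h6
                  by_cases hv1 : v = (0,0); · subst hv1; simp [pvGoA, pvLookupA, pvAns, PySem.Dict.get?]; decide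
                  by_cases hv2 : v = (0,2); · subst hv2; simp [pvGoA, pvLookupA, pvAns, PySem.Dict.get?]; decide
                  by_cases hv3 : v = (2,0); · subst hv3; simp [pvGoA, pvLookupA, pvAns, PySem.Dict.get?]; decide
                  by_cases hv4 : v = (2,2); · subst hv4; simp [pvGoA, pvLookupA, pvAns, PySem.Dict.get?]; decide
                  simp [pvAns, PySem.Dict.get?, beq_iff_eq, Prod.ext_iff, hv1, hv2, hv3, hv4, Ne.symm hv1, Ne.symm hv2, Ne.symm hv3, Ne.symm hv4, ih]
                · simp [pvAns, PySem.Dict.get?, beq_iff_eq, Prod.ext_iff, h1, h2, h3, h4, h5, h6, Ne.symm h1, Ne.symm h2, Ne.symm h3, Ne.symm h4, Ne.symm h5, Ne.symm h6, ih]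

-- ===== VERDICT (by name: the statement is the Claim_ definition above) =====
theorem solveWhiteCornersCorner_spec : Claim_equal_solveWhiteCornersCorner := by
  intro corner _
  unfold Spec_solveWhiteCornersCorner solveWhiteCornersCorner solveWhiteCornersCorner_alt
  exact pvGoA_eq_scanB corner corner
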